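-- pv_equiv track=rewrite | github.com/clasesucatmarlon/AirBnB_clone | console.py | args_data
-- ===== SOURCE A (Python) =====
-- def args_data(string):
--     """ return tuple (commas, index)
--         of the given string
--     """
--     commas, index = 0, []
--     flag = False
--     for c in range(len(string)):
--         if string[c] == "{":
--             flag = True
--         if string[c] == ',' and not flag:
--             commas += 1
--             index.append(c)
--     else:
--         return (commas, index)
-- ===== SOURCE B (Python) =====
-- def args_data(string):
--     """ return tuple (commas, index)
--         of the given string
--     """
--     b = string.find('{')
--     if b == -1:
--         b = len(string)
--     index = [i for i in range(b) if string[i] == ',']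
--     return (len(index), index)
-- ===== Notes on version B (the rewrite author's own statement) =====
-- stated objective: simpler
-- what changed: Replaces the stateful full scan with a never-resetting flag by computing the position of the first '{' via str.find once and collecting comma indices in a single prefix-only comprehension.
import Mathlib
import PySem

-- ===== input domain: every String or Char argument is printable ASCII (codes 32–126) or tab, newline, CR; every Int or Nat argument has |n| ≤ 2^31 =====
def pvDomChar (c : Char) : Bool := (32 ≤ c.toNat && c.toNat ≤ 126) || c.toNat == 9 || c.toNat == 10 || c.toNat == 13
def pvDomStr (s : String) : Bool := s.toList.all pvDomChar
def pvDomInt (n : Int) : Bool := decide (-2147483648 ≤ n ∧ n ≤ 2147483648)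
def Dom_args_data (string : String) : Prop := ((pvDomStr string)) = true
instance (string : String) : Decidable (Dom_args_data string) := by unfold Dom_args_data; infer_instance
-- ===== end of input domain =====

-- B replaces A's full stateful scan (a never-resetting flag) by one str.find for the
-- first '{' followed by a prefix-only comma-index comprehension (simpler decomposition).

-- ===== PORT A =====
-- loop state is (commas, index, flag); 'for c in range(len(string)): … string[c] …'
-- is ported as a fold over the enumerated characters (the same (index, char) pairs)
def args_data (string : String) : Int × List Int :=
  let st := (PySem.List.enumerate string.toList 0).foldl
    (fun (st : Int × List Int × Bool) ic =>
      let flag := if ic.2 = '{' then true else st.2.2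
      if ic.2 = ',' ∧ flag = false then (st.1 + 1, st.2.1 ++ [ic.1], flag)
      else (st.1, st.2.1, flag))
    (0, [], false)
  (st.1, st.2.1)

-- ===== PORT B =====
def args_data_alt (string : String) : Int × List Int :=
  let f := PySem.Str.find string "{"
  let b := if f = -1 then PySem.Str.len string else f
  let index := (PySem.List.pyRange 0 b 1).filter
    (fun i => PySem.List.pyGetD string.toList i ' ' == ',')
  ((index.length : Int), index)

-- ===== PRECONDITION & SPEC =====
def Spec_args_data (string : String) (out : Int × List Int) : Prop := out = args_data_alt string
instance (string : String) (out : Int × List Int) : Decidable (Spec_args_data string out) := by unfold Spec_args_data; infer_instance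

-- ===== CLAIM (what is proved, stated in full; the proofs are below) =====
def Claim_equal_args_data : Prop := ∀ (string : String), Dom_args_data string → Spec_args_data string (args_data string)

-- ===== LEMMAS AND PROOFS =====

-- comma indices (offset n) of the prefix before the first '{' — the common value
def gIdx : List Char → Int → List Int
  | [], _ => []
  | c :: t, n =>
    if c = '{' then []
    else if c = ',' then n :: gIdx t (n + 1) else gIdx t (n + 1)

-- A's step function, named for the lemmas
def aStep (st : Int × List Int × Bool) (ic : Int × Char) : Int × List Int × Bool :=
  let flag := if ic.2 = '{' then true else st.2.2
  if ic.2 = ',' ∧ flag = false then (st.1 + 1, st.2.1 ++ [ic.1], flag)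
  else (st.1, st.2.1, flag)

lemma aStep_flag_true (cs : List Char) (n : Int) (c0 : Int) (l0 : List Int) :
    (PySem.List.enumerate cs n).foldl aStep (c0, l0, true) = (c0, l0, true) := by
  induction cs generalizing n with
  | nil => simp [PySem.List.enumerate_nil]
  | cons c t ih =>
      rw [PySem.List.enumerate_cons]
      simp only [List.foldl_cons]
      have h : aStep (c0, l0, true) (n, c) = (c0, l0, true) := by
        simp [aStep]
      rw [h, ih]

lemma aFold (cs : List Char) (n : Int) (c0 : Int) (l0 : List Int) :
    (PySem.List.enumerate cs n).foldl aStep (c0, l0, false)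
      = (c0 + ((gIdx cs n).length : Int), l0 ++ gIdx cs n, cs.any (· == '{')) := by
  induction cs generalizing n c0 l0 with
  | nil => simp [PySem.List.enumerate_nil, gIdx]
  | cons c t ih =>
      rw [PySem.List.enumerate_cons]
      simp only [List.foldl_cons]
      by_cases hb : c = '{'
      · have h : aStep (c0, l0, false) (n, c) = (c0, l0, true) := by
          simp [aStep, hb]
        rw [h, aStep_flag_true]
        simp [gIdx, hb]
      · by_cases hc : c = ','
        · have h : aStep (c0, l0, false) (n, c) = (c0 + 1, l0 ++ [n], false) := by
            simp [aStep, hc]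
          rw [h, ih]
          simp [gIdx, hc, List.append_assoc]
          ring
        · have h : aStep (c0, l0, false) (n, c) = (c0, l0, false) := by
            simp [aStep, hb, hc]
          rw [h, ih]
          simp [gIdx, hb, hc]

lemma args_data_eq (s : String) :
    args_data s = (((gIdx s.toList 0).length : Int), gIdx s.toList 0) := by
  show (let st := (PySem.List.enumerate s.toList 0).foldl aStep (0, [], false); (st.1, st.2.1))
        = _
  rw [aFold]
  simp

-- first-occurrence search for '{': characterisation of PySem.Chars.find.go
lemma find_go_brace (cs : List Char) (k : Nat) :
    PySem.Chars.find.go ['{'] cs k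
      = if '{' ∈ cs then ((k : Int) + ((cs.takeWhile (fun c => ¬ c = '{')).length : Int)) else -1 := by
  induction cs generalizing k with
  | nil => simp [PySem.Chars.find.go]
  | cons c t ih =>
      rw [PySem.Chars.find.go]
      by_cases hb : c = '{'
      · simp [hb, List.isPrefixOf, List.takeWhile]
      · have hpre : (['{'].isPrefixOf (c :: t)) = false := by
          simp [List.isPrefixOf]
          exact fun h => hb h.symm
        rw [hpre]
        simp only [Bool.false_eq_true, if_false, ih]
        by_cases hm : '{' ∈ t
        · have hmem : '{' ∈ c :: t := List.mem_cons_of_mem c hm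
          simp only [hm, hmem, if_true, List.takeWhile]
          have hbd : (decide (¬ c = '{')) = true := by simp [hb]
          rw [hbd]
          simp only [List.length_cons]
          push_cast; ring
        · have hmem : '{' ∉ c :: t := by
            simp only [List.mem_cons]
            rintro (h | h)
            · exact hb h.symm
            · exact hm h
          simp [hm, hmem]

lemma brace_pos (cs : List Char) :
    (if PySem.Chars.find cs ['{'] = -1 then (cs.length : Int) else PySem.Chars.find cs ['{'])
      = ((cs.takeWhile (fun c => ¬ c = '{')).length : Int) := by
  have h : PySem.Chars.find cs ['{'] = PySem.Chars.find.go ['{'] cs 0 := rfl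
  rw [h, find_go_brace cs 0]
  by_cases hm : '{' ∈ cs
  · simp only [hm, if_true, Nat.cast_zero, zero_add]
    rw [if_neg (by omega)]
  · have hts : List.takeWhile (fun c => !decide (c = '{')) cs = cs := by
      rw [List.takeWhile_eq_self_iff]
      intro x hx
      simp only [Bool.not_eq_true', decide_eq_false_iff_not]
      exact fun h' => hm (h' ▸ hx)
    simp [hm, hts]

lemma pyGetD_cons_pos (c : Char) (t : List Char) (j : Int) (d : Char) (h : 0 < j) :
    PySem.List.pyGetD (c :: t) j d = PySem.List.pyGetD t (j - 1) d := by
  rw [PySem.List.pyGetD_of_nonneg _ _ (le_of_lt h), PySem.List.pyGetD_of_nonneg _ _ (by omega)]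
  have hj : j.toNat = (j - 1).toNat + 1 := by omega
  rw [hj]
  rfl

-- B's filtered range equals gIdx (offset n; the predicate indexes the whole list via i - n)
lemma bFilter (cs : List Char) (n : Int) :
    (PySem.List.pyRange n (n + ((cs.takeWhile (fun c => ¬ c = '{')).length : Int)) 1).filter
        (fun i => PySem.List.pyGetD cs (i - n) ' ' == ',')
      = gIdx cs n := by
  induction cs generalizing n with
  | nil =>
      simp [List.takeWhile, gIdx, PySem.List.pyRange_one_eq_nil (le_refl n)]
  | cons c t ih =>
      by_cases hb : c = '{'
      · simp [List.takeWhile, hb, gIdx, PySem.List.pyRange_one_eq_nil (le_refl n)]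
      · have htw : (c :: t).takeWhile (fun c => ¬ c = '{') = c :: t.takeWhile (fun c => ¬ c = '{') := by
          simp [List.takeWhile, hb]
        rw [htw]
        set L := (t.takeWhile (fun c => ¬ c = '{')).length with hL
        have hsplit : n + ((c :: t.takeWhile (fun c => ¬ c = '{')).length : Int)
            = (n + 1) + (L : Int) := by
          simp only [List.length_cons, hL]; push_cast; ring
        rw [hsplit, PySem.List.pyRange_one_cons (by omega)]
        rw [List.filter_cons]
        have hhd : PySem.List.pyGetD (c :: t) (n - n) ' ' = c := by
          simp [PySem.List.pyGetD, PySem.List.pyGet?, PySem.List.pyIdx?]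
        have htail : (PySem.List.pyRange (n + 1) ((n + 1) + (L : Int)) 1).filter
              (fun i => PySem.List.pyGetD (c :: t) (i - n) ' ' == ',')
            = (PySem.List.pyRange (n + 1) ((n + 1) + (L : Int)) 1).filter
              (fun i => PySem.List.pyGetD t (i - (n + 1)) ' ' == ',') := by
          apply List.filter_congr
          intro i hi
          have hge : n + 1 ≤ i := ((PySem.List.mem_pyRange_one).mp hi).1
          rw [pyGetD_cons_pos c t (i - n) ' ' (by omega)]
          have : i - n - 1 = i - (n + 1) := by ring
          rw [this]
        rw [htail, ih (n + 1)]
        by_cases hc : c = ','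
        · simp [hc, gIdx]
        · have : (PySem.List.pyGetD (c :: t) (n - n) ' ' == ',') = false := by
            rw [hhd]; simp [hc]
          rw [this]
          simp [gIdx, hb, hc]

lemma args_data_alt_eq (s : String) :
    args_data_alt s = (((gIdx s.toList 0).length : Int), gIdx s.toList 0) := by
  unfold args_data_alt
  have hf : PySem.Str.find s "{" = PySem.Chars.find s.toList ['{'] := by
    simp [PySem.Str.find]
  have hlen : PySem.Str.len s = (s.toList.length : Int) := PySem.Str.len_eq s
  simp only [hf, hlen]
  rw [brace_pos s.toList]
  have hzero : (PySem.List.pyRange 0 (((s.toList.takeWhile (fun c => ¬ c = '{')).length : Int)) 1).filter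
        (fun i => PySem.List.pyGetD s.toList i ' ' == ',')
      = (PySem.List.pyRange 0 (0 + ((s.toList.takeWhile (fun c => ¬ c = '{')).length : Int)) 1).filter
        (fun i => PySem.List.pyGetD s.toList (i - 0) ' ' == ',') := by
    simp
  rw [hzero, bFilter s.toList 0]

-- ===== VERDICT (by name: the statement is the Claim_ definition above) =====
theorem args_data_spec : Claim_equal_args_data := by
  intro s _
  unfold Spec_args_data
  rw [args_data_eq, args_data_alt_eq]
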